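-- pv_equiv track=rewrite | github.com/danilocesar1002/sort-tests | tex_structs.py | TeXRadixSort
-- ===== SOURCE A (Python) =====
-- def finalString(procedure):
--     return "\n\n".join(["\\begin{{figure}}[H]\n\\centering\n{}\n\n({})\n\\end{{figure}}".format(procedure[i], i + 1) for i in range(len(procedure))])
--
-- def TeXRadixSort(arr):
--     procedure = []
--
--     for i in range(len(arr[0]) - 1, -1, -1):
--         arr.sort(key = lambda x: x[i])
--
--         string = "\\begin{{tabular}}{{{}}}\n\\hline\n".format("|l"*len(arr) + "|")
--
--         for k in range(len(arr)):
--             string += "\\scalebox{{0.6}}{{{}}} &\n".format(arr[k])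
--
--         string = string[:-2] +  "\\\\ \n\\hline\n"
--         string += "\\end{tabular}"
--
--         procedure.append(string)
--
--     return finalString(procedure)
-- ===== SOURCE B (Python) =====
-- def finalString(procedure):
--     return "\n\n".join("\\begin{{figure}}[H]\n\\centering\n{}\n\n({})\n\\end{{figure}}".format(s, j) for j, s in enumerate(procedure, 1))
--
-- def TeXRadixSort(arr):
--     procedure = []
--     for i in range(len(arr[0]) - 1, -1, -1):
--         buckets = {}
--         for x in arr:
--             buckets.setdefault(x[i], []).append(x)
--         arr[:] = [x for c in sorted(buckets) for x in buckets[c]]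
--         rows = " &\n".join("\\scalebox{{0.6}}{{{}}}".format(x) for x in arr)
--         procedure.append("\\begin{{tabular}}{{{}}}\n\\hline\n{} \\\\ \n\\hline\n\\end{{tabular}}".format("|l" * len(arr) + "|", rows))
--     return finalString(procedure)
-- ===== Notes on version B (the rewrite author's own statement) =====
-- stated objective: alternative
-- what changed: Each pass's library stable sort by the i-th character is replaced by an explicit stable bucket (counting-sort) pass grouping into a dict and concatenating buckets in sorted key order, the LaTeX row block is built by a join comprehension instead of append-then-slice, and the figure join enumerates instead of indexing by range.
import Mathlib
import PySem

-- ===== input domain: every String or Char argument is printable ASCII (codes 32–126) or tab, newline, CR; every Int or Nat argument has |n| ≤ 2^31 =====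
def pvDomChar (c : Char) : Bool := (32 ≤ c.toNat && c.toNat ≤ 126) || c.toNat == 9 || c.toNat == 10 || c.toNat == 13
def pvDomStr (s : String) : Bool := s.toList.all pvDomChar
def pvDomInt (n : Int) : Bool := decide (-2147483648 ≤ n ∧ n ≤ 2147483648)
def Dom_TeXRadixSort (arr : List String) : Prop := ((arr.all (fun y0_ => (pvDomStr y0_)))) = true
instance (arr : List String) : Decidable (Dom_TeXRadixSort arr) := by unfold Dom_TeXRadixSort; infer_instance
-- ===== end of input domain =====

-- B replaces each pass's library stable sort by an explicit stable bucket pass (dict of lists,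
-- buckets concatenated in sorted key order) and builds the LaTeX strings by join/enumerate instead
-- of append-then-slice and range indexing; equivalence is about the RETURN value (both Pythons also
-- mutate arr in place, leaving identical contents).

-- ===== PORT A =====
-- join of the figure blocks over range(len(procedure)), indexing procedure[i]; str(i+1) = toChars
def finalStringA (procedure : List (List Char)) : List Char :=
  List.intercalate "\n\n".toList
    ((PySem.List.pyRange 0 (procedure.length : Int) 1).map
      (fun i => "\\begin{figure}[H]\n\\centering\n".toList ++ PySem.List.pyGetD procedure i []
        ++ "\n\n(".toList ++ PySem.Int.toChars (i + 1) ++ ")\n\\end{figure}".toList))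

-- key lambda x: x[i]; totalised with a default only outside Pre_ (Pre_ keeps every index in range)
def keyAt (i : Int) (x : String) : Char := (PySem.Str.pyGet? x i).getD ' '

def TeXRadixSort (arr : List String) : String :=
  let res := (PySem.List.pyRange ((((PySem.List.pyGetD arr 0 "").toList.length : Int)) - 1) (-1) (-1)).foldl
    (fun (st : List String × List (List Char)) i =>
      let a := PySem.List.sorted st.1 (keyAt i) false
      let s0 := "\\begin{tabular}{".toList ++ (List.replicate a.length "|l".toList).flatten
        ++ "|}\n\\hline\n".toList
      let s1 := (PySem.List.pyRange 0 (a.length : Int) 1).foldl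
        (fun acc k => acc ++ ("\\scalebox{0.6}{".toList ++ (PySem.List.pyGetD a k "").toList ++ "} &\n".toList)) s0
      let s2 := PySem.List.slice s1 none (some (-2)) ++ ("\\\\ \n\\hline\n".toList ++ "\\end{tabular}".toList)
      (a, st.2 ++ [s2]))
    (arr, [])
  String.ofList (finalStringA res.2)

-- ===== PORT B =====
-- join of the figure blocks over enumerate(procedure, 1)
def finalStringB (procedure : List (List Char)) : List Char :=
  List.intercalate "\n\n".toList
    ((PySem.List.enumerate procedure 1).map
      (fun p => "\\begin{figure}[H]\n\\centering\n".toList ++ p.2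
        ++ "\n\n(".toList ++ PySem.Int.toChars p.1 ++ ")\n\\end{figure}".toList))

def TeXRadixSort_alt (arr : List String) : String :=
  let res := (PySem.List.pyRange ((((PySem.List.pyGetD arr 0 "").toList.length : Int)) - 1) (-1) (-1)).foldl
    (fun (st : List String × List (List Char)) i =>
      let buckets := st.1.foldl
        (fun d x => PySem.Dict.modify d (keyAt i x) [] (· ++ [x])) PySem.Dict.empty
      let a := (PySem.List.sorted (PySem.Dict.keys buckets) (fun c => c) false).flatMap
        (fun c => PySem.Dict.getD buckets c [])
      let rows := List.intercalate " &\n".toList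
        (a.map (fun x => "\\scalebox{0.6}{".toList ++ x.toList ++ "}".toList))
      let tab := "\\begin{tabular}{".toList ++ (List.replicate a.length "|l".toList).flatten
        ++ "|}\n\\hline\n".toList ++ rows ++ " \\\\ \n\\hline\n\\end{tabular}".toList
      (a, st.2 ++ [tab]))
    (arr, [])
  String.ofList (finalStringB res.2)

-- ===== PRECONDITION & SPEC =====
-- Pre_ excludes exactly the IndexError inputs: an empty input list (indexing its first element
-- raises) and any element shorter than the first element (indexing it at some pass raises).
def Pre_TeXRadixSort (arr : List String) : Prop :=
  arr ≠ [] ∧ ∀ s ∈ arr, (PySem.List.pyGetD arr 0 "").toList.length ≤ s.toList.length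
instance (arr : List String) : Decidable (Pre_TeXRadixSort arr) := by unfold Pre_TeXRadixSort; infer_instance

def pvWitness_TeXRadixSort : List String := ["ba", "ab", "aa"]

def Spec_TeXRadixSort (arr : List String) (out : String) : Prop := out = TeXRadixSort_alt arr
instance (arr : List String) (out : String) : Decidable (Spec_TeXRadixSort arr out) := by unfold Spec_TeXRadixSort; infer_instance

-- ===== CLAIM (what is proved, stated in full; the proofs are below) =====
def Claim_equal_TeXRadixSort : Prop := ∀ (arr : List String), Dom_TeXRadixSort arr → Pre_TeXRadixSort arr → Spec_TeXRadixSort arr (TeXRadixSort arr)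

-- ===== LEMMAS AND PROOFS =====

theorem foldl_eq_of_inv {α β : Type} (P : β → Prop) (f g : β → α → β) (l : List α) (init : β)
    (hinit : P init) (hstep : ∀ b a, P b → f b a = g b a ∧ P (f b a)) :
    l.foldl f init = l.foldl g init := by
  induction l generalizing init with
  | nil => rfl
  | cons a l ih =>
      obtain ⟨he, hp⟩ := hstep init a hinit
      simp only [List.foldl_cons, he]
      exact ih (g init a) (he ▸ hp)

theorem insertBy_append_left {α : Type} (bf : α → α → Bool) (x : α) (l1 l2 : List α)
    (h1 : ∀ y ∈ l1, bf x y = false) :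
    PySem.List.insertBy bf x (l1 ++ l2) = l1 ++ PySem.List.insertBy bf x l2 := by
  induction l1 with
  | nil => rfl
  | cons y ys ih =>
      simp only [List.cons_append, PySem.List.insertBy, h1 y (by simp)]
      simp only [Bool.false_eq_true, if_false, List.cons.injEq, true_and]
      exact ih (fun z hz => h1 z (by simp [hz]))

theorem insertBy_split {α : Type} (bf : α → α → Bool) (x : α) (l1 l2 : List α)
    (h1 : ∀ y ∈ l1, bf x y = false) (h2 : ∀ y ∈ l2, bf x y = true) :
    PySem.List.insertBy bf x (l1 ++ l2) = l1 ++ x :: l2 := by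
  rw [insertBy_append_left bf x l1 l2 h1]
  cases l2 with
  | nil => rfl
  | cons y ys => simp [PySem.List.insertBy, h2 y (by simp)]

theorem insertBy_flatMap_filter {α κ : Type} [LinearOrder κ] (key : α → κ) (x : α) (xs : List α) :
    ∀ ks : List κ, ks.Pairwise (· < ·) → key x ∈ ks →
    PySem.List.insertBy (fun a b => decide (key a < key b)) x
        (ks.flatMap (fun c => xs.filter (fun y => decide (key y = c))))
      = ks.flatMap (fun c => (xs ++ [x]).filter (fun y => decide (key y = c))) := by
  intro ks
  induction ks with
  | nil => intro _ h; exact absurd h (List.not_mem_nil)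
  | cons c ks ih =>
      intro hp hmem
      obtain ⟨hlt, hp'⟩ := List.pairwise_cons.mp hp
      simp only [List.flatMap_cons]
      by_cases hx : key x = c
      · have h1 : ∀ y ∈ xs.filter (fun y => decide (key y = c)),
            (fun a b => decide (key a < key b)) x y = false := by
          intro y hy
          have hy2 := of_decide_eq_true (List.mem_filter.mp hy).2
          simp [hy2, hx]
        have h2 : ∀ y ∈ ks.flatMap (fun c => xs.filter (fun y => decide (key y = c))),
            (fun a b => decide (key a < key b)) x y = true := by
          intro y hy
          obtain ⟨c', hc', hy2⟩ := List.mem_flatMap.mp hy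
          have := of_decide_eq_true (List.mem_filter.mp hy2).2
          simp [this, hx]
          exact hlt c' hc'
        rw [insertBy_split _ _ _ _ h1 h2]
        have hfirst : (xs ++ [x]).filter (fun y => decide (key y = c))
            = xs.filter (fun y => decide (key y = c)) ++ [x] := by
          simp [List.filter_append, hx]
        have hrest : ks.flatMap (fun c => (xs ++ [x]).filter (fun y => decide (key y = c)))
            = ks.flatMap (fun c => xs.filter (fun y => decide (key y = c))) := by
          apply List.flatMap_congr
          intro c' hc'
          have hne : key x ≠ c' := by
            intro h; exact absurd (h ▸ hx ▸ rfl : (c:κ) = c') (by have := hlt c' hc'; exact fun hh => absurd (hh ▸ this) (lt_irrefl c'))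
          simp [List.filter_append, hne]
        rw [hfirst, hrest]
        simp
      · have hmem' : key x ∈ ks := by
          rcases List.mem_cons.mp hmem with h | h
          · exact absurd h hx
          · exact h
        have h1 : ∀ y ∈ xs.filter (fun y => decide (key y = c)),
            (fun a b => decide (key a < key b)) x y = false := by
          intro y hy
          have hy2 := of_decide_eq_true (List.mem_filter.mp hy).2
          have : c < key x := hlt _ hmem'
          simp [hy2]
          exact le_of_lt this
        rw [insertBy_append_left _ _ _ _ h1, ih hp' hmem']
        have hfirst : (xs ++ [x]).filter (fun y => decide (key y = c))
            = xs.filter (fun y => decide (key y = c)) := by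
          simp [List.filter_append, hx]
        rw [hfirst]

theorem sorted_eq_flatMap_filter {α κ : Type} [LinearOrder κ] (key : α → κ) :
    ∀ (ks : List κ), ks.Pairwise (· < ·) →
    ∀ (xs : List α), (∀ x ∈ xs, key x ∈ ks) →
    PySem.List.sorted xs key false = ks.flatMap (fun c => xs.filter (fun x => decide (key x = c))) := by
  intro ks hks xs hxs
  induction xs using List.reverseRecOn with
  | nil => simp [PySem.List.sorted]
  | append_singleton xs x ih =>
      rw [PySem.List.sorted_eq_foldl_insertBy, List.foldl_append]
      rw [← PySem.List.sorted_eq_foldl_insertBy]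
      rw [ih (fun y hy => hxs y (by simp [hy]))]
      simp only [List.foldl_cons, List.foldl_nil]
      exact insertBy_flatMap_filter key x xs ks hks (hxs x (by simp))

theorem bucket_getD {κ α : Type} [BEq κ] [LawfulBEq κ] (key : α → κ) (xs : List α) (c : κ) :
    (xs.foldl (fun d x => PySem.Dict.modify d (key x) [] (· ++ [x])) PySem.Dict.empty).getD c []
      = xs.filter (fun x => key x == c) := by
  have h := PySem.Dict.getD_foldl_modify_append (l := xs.map (fun x => (key x, x))) (d := PySem.Dict.empty) (c := c)
  rw [List.foldl_map] at h
  simp only [h, PySem.Dict.getD_empty, List.nil_append, List.filter_map, List.map_map]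
  simp [Function.comp_def]

theorem bucket_keys {κ α : Type} [BEq κ] [LawfulBEq κ] (key : α → κ) (xs : List α) :
    (xs.foldl (fun d x => PySem.Dict.modify d (key x) [] (· ++ [x])) PySem.Dict.empty).keys
      = PySem.Set.ofList (xs.map key) := by
  rw [PySem.Dict.keys_foldl_modify_key]
  simp [PySem.Set.update_nil_left, PySem.Dict.keys_empty]

theorem bucket_sort_eq {α κ : Type} [LinearOrder κ] [BEq κ] [LawfulBEq κ] (key : α → κ) (xs : List α) :
    ((PySem.List.sorted
        ((xs.foldl (fun d x => PySem.Dict.modify d (key x) [] (· ++ [x])) PySem.Dict.empty).keys)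
        (fun c => c) false).flatMap
      (fun c => (xs.foldl (fun d x => PySem.Dict.modify d (key x) [] (· ++ [x])) PySem.Dict.empty).getD c []))
      = PySem.List.sorted xs key false := by
  rw [bucket_keys]
  have hpair : (PySem.List.sorted (PySem.Set.ofList (xs.map key)) (fun c => c) false).Pairwise (· < ·) :=
    PySem.List.sorted_ofList_pairwise_lt (xs.map key)
  have hmem : ∀ x ∈ xs, key x ∈ PySem.List.sorted (PySem.Set.ofList (xs.map key)) (fun c => c) false := by
    intro x hx
    rw [PySem.List.mem_sorted, PySem.Set.mem_ofList]
    exact List.mem_map.mpr ⟨x, hx, rfl⟩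
  rw [sorted_eq_flatMap_filter key _ hpair xs hmem]
  apply List.flatMap_congr
  intro c hc
  rw [bucket_getD]
  apply List.filter_congr
  intro x hx
  by_cases h : key x = c
  · simp [h]
  · simp [h]

theorem flatMap_append_sep {α : Type} (g : α → List Char) (sep : List Char) :
    ∀ (l : List α), l ≠ [] →
    l.flatMap (fun x => g x ++ sep) = List.intercalate sep (l.map g) ++ sep := by
  intro l
  induction l with
  | nil => intro h; exact absurd rfl h
  | cons z t ih =>
      intro _
      cases t with
      | nil => simp [List.intercalate]
      | cons w t' =>
          rw [List.flatMap_cons, ih (by simp)]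
          simp [List.intercalate, List.append_assoc]

theorem row_block_eq (a : List String) (ha : a ≠ []) (s0 : List Char) :
    PySem.List.slice
      ((PySem.List.pyRange 0 (a.length : Int) 1).foldl
        (fun acc k => acc ++ ("\\scalebox{0.6}{".toList ++ (PySem.List.pyGetD a k "").toList ++ "} &\n".toList)) s0)
      none (some (-2)) ++ ("\\\\ \n\\hline\n".toList ++ "\\end{tabular}".toList)
    = s0 ++ List.intercalate " &\n".toList
        (a.map (fun x => "\\scalebox{0.6}{".toList ++ x.toList ++ "}".toList))
      ++ " \\\\ \n\\hline\n\\end{tabular}".toList := by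
  rw [PySem.List.foldl_pyRange_zero_pyGetD' a ""
      (fun acc x => acc ++ ("\\scalebox{0.6}{".toList ++ x.toList ++ "} &\n".toList)) s0]
  rw [PySem.List.foldl_append_eq_flatMap]
  have hsplit : (fun (x : String) => "\\scalebox{0.6}{".toList ++ x.toList ++ "} &\n".toList)
      = (fun x => ("\\scalebox{0.6}{".toList ++ x.toList ++ "}".toList) ++ " &\n".toList) := by
    funext x; simp [List.append_assoc]
  rw [hsplit, flatMap_append_sep _ _ a ha]
  set I := List.intercalate " &\n".toList (a.map (fun x => "\\scalebox{0.6}{".toList ++ x.toList ++ "}".toList)) with hI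
  have hY : s0 ++ (I ++ " &\n".toList) = (s0 ++ I ++ [' ']) ++ ['&', '\n'] := by
    simp [List.append_assoc]
  rw [hY, PySem.List.slice_to_neg_ofNat _ 2 (by omega)]
  have hlen : ((s0 ++ I ++ [' ']) ++ ['&', '\n']).length - 2 = (s0 ++ I ++ [' ']).length := by
    simp; omega
  rw [hlen, List.take_left]
  simp [List.append_assoc]


theorem enumerate_shift {α : Type} (xs : List α) (s : Int) :
    PySem.List.enumerate xs (s + 1) = (PySem.List.enumerate xs s).map (fun p => (p.1 + 1, p.2)) := by
  induction xs generalizing s with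
  | nil => simp [PySem.List.enumerate_nil]
  | cons x xs ih => simp [PySem.List.enumerate_cons, ih]

theorem finalString_eq (procedure : List (List Char)) :
    finalStringA procedure = finalStringB procedure := by
  unfold finalStringA finalStringB
  congr 1
  have h0 : PySem.List.enumerate procedure (1 : Int) = (PySem.List.enumerate procedure 0).map (fun p => (p.1 + 1, p.2)) := by
    have := enumerate_shift procedure 0
    norm_num at this
    exact this
  rw [h0, PySem.List.enumerate_eq_map_pyRange (d := []), List.map_map, List.map_map]
  rfl

-- one pass of A equals one pass of B, and keeps the list nonempty
theorem step_eq (i : Int) (st : List String × List (List Char)) (h : st.1 ≠ []) :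
    (let a := PySem.List.sorted st.1 (keyAt i) false
     let s0 := "\\begin{tabular}{".toList ++ (List.replicate a.length "|l".toList).flatten
       ++ "|}\n\\hline\n".toList
     let s1 := (PySem.List.pyRange 0 (a.length : Int) 1).foldl
       (fun acc k => acc ++ ("\\scalebox{0.6}{".toList ++ (PySem.List.pyGetD a k "").toList ++ "} &\n".toList)) s0
     let s2 := PySem.List.slice s1 none (some (-2)) ++ ("\\\\ \n\\hline\n".toList ++ "\\end{tabular}".toList)
     ((a, st.2 ++ [s2]) : List String × List (List Char)))
    = (let buckets := st.1.foldl
         (fun d x => PySem.Dict.modify d (keyAt i x) [] (· ++ [x])) PySem.Dict.empty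
       let a := (PySem.List.sorted (PySem.Dict.keys buckets) (fun c => c) false).flatMap
         (fun c => PySem.Dict.getD buckets c [])
       let rows := List.intercalate " &\n".toList
         (a.map (fun x => "\\scalebox{0.6}{".toList ++ x.toList ++ "}".toList))
       let tab := "\\begin{tabular}{".toList ++ (List.replicate a.length "|l".toList).flatten
         ++ "|}\n\\hline\n".toList ++ rows ++ " \\\\ \n\\hline\n\\end{tabular}".toList
       ((a, st.2 ++ [tab]) : List String × List (List Char))) := by
  have hb := bucket_sort_eq (keyAt i) st.1
  simp only [hb]
  have ha : PySem.List.sorted st.1 (keyAt i) false ≠ [] := by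
    rw [Ne, PySem.List.sorted_eq_nil_iff]; exact h
  rw [← row_block_eq (PySem.List.sorted st.1 (keyAt i) false) ha]

-- ===== VERDICT (by name: the statement is the Claim_ definition above) =====
theorem TeXRadixSort_spec : Claim_equal_TeXRadixSort := by
  intro arr hdom hpre
  show TeXRadixSort arr = TeXRadixSort_alt arr
  unfold TeXRadixSort TeXRadixSort_alt
  simp only []
  rw [← finalString_eq]
  exact congrArg (fun (r : List String × List (List Char)) => String.ofList (finalStringA r.2))
    (foldl_eq_of_inv (fun (st : List String × List (List Char)) => st.1 ≠ []) _ _ _ _ hpre.1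
      (fun st i hst => ⟨step_eq i st hst, by
        show PySem.List.sorted st.1 (keyAt i) false ≠ []
        rw [Ne, PySem.List.sorted_eq_nil_iff]; exact hst⟩))
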